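-- pv_equiv track=rewrite | github.com/luxonis/capture-viewer | utils/convert/dictionary_tools.py | get_filter_order_back
-- ===== SOURCE A (Python) =====
-- def get_filter_order_back(order_string):
--     result = [0, 0, 0, 0, 0]
--     names = ["DECIMATION", "MEDIAN", "SPECKLE", "TEMPORAL", "SPATIAL"]
--     for i, item in enumerate(order_string.split(',')):
--         for j in range(len(names)):
--             if names[j] in item:
--                 result[j] = i+1
--     return result
-- ===== SOURCE B (Python) =====
-- def get_filter_order_back(order_string):
--     items = order_string.split(',')
--     names = ["DECIMATION", "MEDIAN", "SPECKLE", "TEMPORAL", "SPATIAL"]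
--     n = len(items)
--     result = []
--     for name in names:
--         pos = 0
--         for k, item in enumerate(reversed(items)):
--             if name in item:
--                 pos = n - k
--                 break
--         result.append(pos)
--     return result
-- ===== Notes on version B (the rewrite author's own statement) =====
-- stated objective: alternative
-- what changed: B scans the items in REVERSE per name with an early break at the first match (first match from the end = A's last overwrite), computing each slot as n-k, instead of A's single forward pass that mutates a 5-slot result in place.
import Mathlib
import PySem

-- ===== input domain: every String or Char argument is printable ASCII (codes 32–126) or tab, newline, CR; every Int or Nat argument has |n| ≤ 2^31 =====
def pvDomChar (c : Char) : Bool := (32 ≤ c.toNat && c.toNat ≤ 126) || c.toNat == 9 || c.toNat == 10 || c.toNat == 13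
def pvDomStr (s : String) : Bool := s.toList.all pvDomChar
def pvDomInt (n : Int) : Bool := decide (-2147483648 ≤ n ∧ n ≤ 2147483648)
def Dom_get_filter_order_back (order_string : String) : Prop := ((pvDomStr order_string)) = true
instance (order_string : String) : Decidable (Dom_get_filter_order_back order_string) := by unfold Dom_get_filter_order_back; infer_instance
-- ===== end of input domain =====

-- B replaces A's forward pass with in-place overwrites by a per-name REVERSE scan with an early break (first match from the end, slot = n-k); alternative decomposition, same cost.


-- ===== PORT A =====
def pvNames : List String := ["DECIMATION", "MEDIAN", "SPECKLE", "TEMPORAL", "SPATIAL"]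

-- literal port of A: one pass over the comma-split items, inner loop over j in range(5),
-- in-place assignment result[j] = i+1 (j ∈ [0,4] is always in range, so List.set j.toNat is exact)
def get_filter_order_back (order_string : String) : List Int :=
  (PySem.List.enumerate ((PySem.Str.split? order_string ",").getD [])).foldl
    (fun result p =>
      (PySem.List.pyRange 0 5 1).foldl
        (fun result j =>
          if PySem.Str.isIn (PySem.List.pyGetD pvNames j "") p.2 then
            result.set j.toNat (p.1 + 1)
          else result)
        result)
    [0, 0, 0, 0, 0]

-- ===== PORT B =====
-- port of B's inner 'for k, item in enumerate(reversed(items)): if name in item: pos = n - k; break'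
def pvRevFirst (name : String) (n : Int) : List String → Int → Int
  | [], _ => 0
  | x :: rest, k => if PySem.Str.isIn name x then n - k else pvRevFirst name n rest (k + 1)

-- literal port of B: for each name, scan reversed items, first match from the end wins
def get_filter_order_back_alt (order_string : String) : List Int :=
  let items := (PySem.Str.split? order_string ",").getD []
  let n : Int := items.length
  pvNames.map (fun name => pvRevFirst name n items.reverse 0)

-- ===== PRECONDITION & SPEC =====
def Spec_get_filter_order_back (order_string : String) (out : List Int) : Prop := out = get_filter_order_back_alt order_string
instance (order_string : String) (out : List Int) : Decidable (Spec_get_filter_order_back order_string out) := by unfold Spec_get_filter_order_back; infer_instance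

-- ===== CLAIM (what is proved, stated in full; the proofs are below) =====
def Claim_equal_get_filter_order_back : Prop := ∀ (order_string : String), Dom_get_filter_order_back order_string → Spec_get_filter_order_back order_string (get_filter_order_back order_string)

-- ===== LEMMAS AND PROOFS =====

-- A's per-name behaviour on one coordinate: the last matching index + 1, else the carried value
def pvLast (name : String) (xs : List String) (s d : Int) : Int :=
  (PySem.List.enumerate xs s).foldl
    (fun acc p => if PySem.Str.isIn name p.2 then p.1 + 1 else acc) d

lemma pvLast_nil (name : String) (s d : Int) : pvLast name [] s d = d := by
  simp [pvLast, PySem.List.enumerate_nil]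

lemma pvLast_cons (name y : String) (ys : List String) (s d : Int) :
    pvLast name (y :: ys) s d
      = pvLast name ys (s + 1) (if PySem.Str.isIn name y then s + 1 else d) := by
  simp only [pvLast, PySem.List.enumerate_cons, List.foldl_cons]

lemma pvLast_append (name x : String) :
    ∀ (ys : List String) (s d : Int),
      pvLast name (ys ++ [x]) s d
        = if PySem.Str.isIn name x then s + ys.length + 1 else pvLast name ys s d := by
  intro ys
  induction ys with
  | nil =>
    intro s d
    rw [List.nil_append, pvLast_cons, pvLast_nil]
    split_ifs <;> first | rfl | (rw [pvLast_nil]) | simp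
  | cons y ys ih =>
    intro s d
    rw [List.cons_append, pvLast_cons, ih, pvLast_cons]
    split_ifs <;> simp only [List.length_cons] <;> push_cast <;> first | omega | rfl

-- B's reverse scan with early break computes the same per-name value (order does not matter)
lemma pv_rev_eq (name : String) :
    ∀ (ys : List String) (k : Int),
      pvRevFirst name (k + ys.length) ys.reverse k = pvLast name ys 0 0 := by
  intro ys
  induction ys using List.reverseRecOn with
  | nil => intro k; simp [pvRevFirst, pvLast_nil]
  | append_singleton ys x ih =>
    intro k
    rw [List.reverse_append, List.reverse_singleton, List.singleton_append,
        pvLast_append]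
    simp only [pvRevFirst]
    by_cases h : PySem.Str.isIn name x = true
    · simp only [h, if_pos]
      simp only [List.length_append, List.length_singleton]
      push_cast
      omega
    · simp only [h, Bool.false_eq_true, if_neg, not_false_iff]
      have hn : k + ((ys ++ [x]).length : Int) = (k + 1) + ys.length := by
        simp only [List.length_append, List.length_singleton]
        push_cast; omega
      rw [hn, ih (k + 1)]

-- one step of A's inner loop on a concrete 5-slot accumulator
lemma pv_astep (i : Int) (x : String) (r0 r1 r2 r3 r4 : Int) :
    (PySem.List.pyRange 0 5 1).foldl
      (fun result j =>
        if PySem.Str.isIn (PySem.List.pyGetD pvNames j "") x then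
          result.set j.toNat (i + 1)
        else result)
      [r0, r1, r2, r3, r4]
    = [if PySem.Str.isIn "DECIMATION" x then i + 1 else r0,
       if PySem.Str.isIn "MEDIAN" x then i + 1 else r1,
       if PySem.Str.isIn "SPECKLE" x then i + 1 else r2,
       if PySem.Str.isIn "TEMPORAL" x then i + 1 else r3,
       if PySem.Str.isIn "SPATIAL" x then i + 1 else r4] := by
  rw [show PySem.List.pyRange 0 5 1 = [0, 1, 2, 3, 4] from by decide]
  simp only [List.foldl_cons, List.foldl_nil]
  rw [show PySem.List.pyGetD pvNames 0 "" = "DECIMATION" from rfl,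
      show PySem.List.pyGetD pvNames 1 "" = "MEDIAN" from rfl,
      show PySem.List.pyGetD pvNames 2 "" = "SPECKLE" from rfl,
      show PySem.List.pyGetD pvNames 3 "" = "TEMPORAL" from rfl,
      show PySem.List.pyGetD pvNames 4 "" = "SPATIAL" from rfl]
  split_ifs <;> rfl

lemma pv_afold (xs : List String) :
    ∀ (s r0 r1 r2 r3 r4 : Int),
      (PySem.List.enumerate xs s).foldl
        (fun result p =>
          (PySem.List.pyRange 0 5 1).foldl
            (fun result j =>
              if PySem.Str.isIn (PySem.List.pyGetD pvNames j "") p.2 then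
                result.set j.toNat (p.1 + 1)
              else result)
            result)
        [r0, r1, r2, r3, r4]
      = [pvLast "DECIMATION" xs s r0, pvLast "MEDIAN" xs s r1, pvLast "SPECKLE" xs s r2,
         pvLast "TEMPORAL" xs s r3, pvLast "SPATIAL" xs s r4] := by
  induction xs with
  | nil => intro s r0 r1 r2 r3 r4; simp [pvLast, PySem.List.enumerate_nil]
  | cons x xs ih =>
    intro s r0 r1 r2 r3 r4
    rw [PySem.List.enumerate_cons, List.foldl_cons, pv_astep, ih]
    simp [pvLast, PySem.List.enumerate_cons, List.foldl_cons]

-- ===== VERDICT (by name: the statement is the Claim_ definition above) =====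
theorem get_filter_order_back_spec : Claim_equal_get_filter_order_back := by
  intro s _
  unfold Spec_get_filter_order_back get_filter_order_back get_filter_order_back_alt
  rw [pv_afold]
  simp only [pvNames, List.map_cons, List.map_nil]
  rw [show (((PySem.Str.split? s ",").getD []).length : Int)
        = 0 + ((PySem.Str.split? s ",").getD []).length from (zero_add _).symm]
  rw [pv_rev_eq, pv_rev_eq, pv_rev_eq, pv_rev_eq, pv_rev_eq]
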